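-- pv_equiv track=rewrite | github.com/yacb2/lore | src/domaintome/cli/main.py | _match_edit_path_to_nodes
-- ===== SOURCE A (Python) =====
-- def _match_edit_path_to_nodes(
--     ref_index: dict[str, list[dict[str, str]]],
--     abs_path: str,
-- ) -> list[dict[str, str]]:
--     """Return nodes whose source_ref path is a suffix of abs_path.
--
--     Source refs in the wild are stored relative to repo or workspace root
--     (e.g. ``backend/apps/x/views.py`` or ``apps/x/views.py``); the absolute
--     path coming from an Edit/Write tool is canonical. Suffix matching makes
--     the lookup robust to either convention without forcing one.
--     """
--     if not abs_path:
--         return []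
--     norm = abs_path.replace("\\", "/")
--     matches: list[dict[str, str]] = []
--     seen: set[str] = set()
--     for key, nodes in ref_index.items():
--         if not key:
--             continue
--         if norm == key or norm.endswith("/" + key):
--             for n in nodes:
--                 if n["id"] not in seen:
--                     seen.add(n["id"])
--                     matches.append(n)
--     return matches
-- ===== SOURCE B (Python) =====
-- def _match_edit_path_to_nodes(
--     ref_index: dict[str, list[dict[str, str]]],
--     abs_path: str,
-- ) -> list[dict[str, str]]:
--     """Suffix-lookup variant: enumerate the path suffixes of abs_path and look
--     them up in the index, instead of testing every index key against abs_path;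
--     matched keys are replayed in index insertion order."""
--     if not abs_path:
--         return []
--     norm = abs_path.replace("\\", "/")
--     pos = {k: i for i, k in enumerate(ref_index)}
--     cands = [norm] + [norm[i + 1:] for i, c in enumerate(norm) if c == "/"]
--     hits = sorted(((pos[s], s) for s in cands if s and s in pos), key=lambda t: t[0])
--     matches, seen = [], set()
--     for _, key in hits:
--         for n in ref_index[key]:
--             if n["id"] not in seen:
--                 seen.add(n["id"])
--                 matches.append(n)
--     return matches
-- ===== Notes on version B (the rewrite author's own statement) =====
-- stated objective: alternative
-- what changed: Instead of testing every index key against abs_path with endswith, B enumerates the slash-delimited suffixes of abs_path, looks each up in a precomputed key->position dict, sorts the hits by insertion position and replays only the matched entries.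
import Mathlib
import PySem

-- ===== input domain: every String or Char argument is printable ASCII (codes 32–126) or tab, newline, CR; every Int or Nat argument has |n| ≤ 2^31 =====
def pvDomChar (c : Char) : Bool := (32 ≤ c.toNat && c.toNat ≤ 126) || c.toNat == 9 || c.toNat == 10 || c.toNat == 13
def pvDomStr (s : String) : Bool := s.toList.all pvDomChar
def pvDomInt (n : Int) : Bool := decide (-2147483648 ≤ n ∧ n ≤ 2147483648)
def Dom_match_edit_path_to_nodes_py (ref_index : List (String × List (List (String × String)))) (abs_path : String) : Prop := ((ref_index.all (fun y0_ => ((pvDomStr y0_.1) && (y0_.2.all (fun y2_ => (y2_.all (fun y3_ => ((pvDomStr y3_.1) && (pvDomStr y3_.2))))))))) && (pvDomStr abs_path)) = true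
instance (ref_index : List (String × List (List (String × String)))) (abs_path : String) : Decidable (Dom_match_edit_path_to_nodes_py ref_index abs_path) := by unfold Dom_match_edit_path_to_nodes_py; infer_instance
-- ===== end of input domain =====

-- B replaces A's per-key endswith scan by a different algorithm: it enumerates the
-- slash suffixes of abs_path, looks each up in a key->position dict, and replays the
-- hits sorted by insertion position (objective: alternative; same return value under Pre_).

-- ===== PORT A =====
-- the shared inner loop body of the Pythons ('for n in nodes: if n["id"] not in seen: …');
-- n["id"] is ported as getD "" — total form; Pre_ guarantees the key is present where A reaches it
def pvInner (st : List (List (String × String)) × PySem.Set String) (n : List (String × String)) :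
    List (List (String × String)) × PySem.Set String :=
  let i := (PySem.Dict.get? (PySem.Dict.mk n) "id").getD ""
  if PySem.Set.contains st.2 i then st else (st.1 ++ [n], PySem.Set.add st.2 i)

def match_edit_path_to_nodes_py (ref_index : List (String × List (List (String × String)))) (abs_path : String) : List (List (String × String)) :=
  if abs_path = "" then []
  else
    let norm := PySem.Str.replace abs_path "\\" "/"
    (ref_index.foldl
      (fun (st : List (List (String × String)) × PySem.Set String) kn =>
        if kn.1 = "" then st
        else if norm = kn.1 ∨ PySem.Str.endswith norm ("/" ++ kn.1) = true then
          kn.2.foldl pvInner st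
        else st)
      ([], PySem.Set.empty)).1

-- ===== PORT B =====
def match_edit_path_to_nodes_py_alt (ref_index : List (String × List (List (String × String)))) (abs_path : String) : List (List (String × String)) :=
  if abs_path = "" then []
  else
    let norm := PySem.Str.replace abs_path "\\" "/"
    -- pos = {k: i for i, k in enumerate(ref_index)}
    let pos : PySem.Dict String Int :=
      (PySem.List.enumerate ref_index 0).foldl (fun d ik => d.insert ik.2.1 ik.1) PySem.Dict.empty
    -- cands = [norm] + [norm[i+1:] for i, c in enumerate(norm) if c == "/"]
    let cands : List String :=
      norm :: (PySem.List.enumerate norm.toList 0).filterMap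
        (fun ic => if ic.2 = '/' then some (PySem.Str.slice norm (some (ic.1 + 1)) none) else none)
    -- hits = sorted(((pos[s], s) for s in cands if s and s in pos), key=lambda t: t[0])
    let hits : List (Int × String) := PySem.List.sorted
      (cands.filterMap (fun s => if s ≠ "" then (pos.get? s).map (fun p => (p, s)) else none))
      (fun t => t.1) false
    (hits.foldl
      (fun (st : List (List (String × String)) × PySem.Set String) pk =>
        ((PySem.Dict.get? (PySem.Dict.mk ref_index) pk.2).getD []).foldl pvInner st)
      ([], PySem.Set.empty)).1

-- ===== PRECONDITION & SPEC =====
-- Pre_ excludes (a) duplicate keys in ref_index, which a Python dict cannot represent, and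
-- (b) inputs where some node of a MATCHED entry lacks the "id" key, on which A raises KeyError.
def Pre_match_edit_path_to_nodes_py (ref_index : List (String × List (List (String × String)))) (abs_path : String) : Prop :=
  (ref_index.map Prod.fst).Nodup ∧
  ∀ kn ∈ ref_index, kn.1 ≠ "" →
    ((PySem.Str.replace abs_path "\\" "/") = kn.1 ∨
      PySem.Str.endswith (PySem.Str.replace abs_path "\\" "/") ("/" ++ kn.1) = true) →
    ∀ n ∈ kn.2, "id" ∈ n.map Prod.fst
instance (ref_index : List (String × List (List (String × String)))) (abs_path : String) : Decidable (Pre_match_edit_path_to_nodes_py ref_index abs_path) := by unfold Pre_match_edit_path_to_nodes_py; infer_instance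

def pvWitness_match_edit_path_to_nodes_py : (List (String × List (List (String × String)))) × String :=
  ([("a/b.py", [[("id", "1")], [("id", "2")]]), ("c.py", [[("id", "1")]])], "/x/a/b.py")

def Spec_match_edit_path_to_nodes_py (ref_index : List (String × List (List (String × String)))) (abs_path : String) (out : List (List (String × String))) : Prop := out = match_edit_path_to_nodes_py_alt ref_index abs_path
instance (ref_index : List (String × List (List (String × String)))) (abs_path : String) (out : List (List (String × String))) : Decidable (Spec_match_edit_path_to_nodes_py ref_index abs_path out) := by unfold Spec_match_edit_path_to_nodes_py; infer_instance

-- ===== CLAIM (what is proved, stated in full; the proofs are below) =====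
def Claim_equal_match_edit_path_to_nodes_py : Prop := ∀ (ref_index : List (String × List (List (String × String)))) (abs_path : String), Dom_match_edit_path_to_nodes_py ref_index abs_path → Pre_match_edit_path_to_nodes_py ref_index abs_path → Spec_match_edit_path_to_nodes_py ref_index abs_path (match_edit_path_to_nodes_py ref_index abs_path)

-- ===== LEMMAS AND PROOFS =====

-- the Boolean match predicate on an index entry
def pvMatch (norm : String) (kn : String × List (List (String × String))) : Bool :=
  !(kn.1 == "") && (norm == kn.1 || PySem.Str.endswith norm ("/" ++ kn.1))

-- a skip-shaped foldl is a foldl over the filter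
theorem pv_foldl_filter {α σ : Type} (l : List α) (p : α → Bool) (g : σ → α → σ) (init : σ) :
    l.foldl (fun st x => if p x then g st x else st) init = (l.filter p).foldl g init := by
  induction l generalizing init with
  | nil => rfl
  | cons x xs ih =>
      by_cases h : p x <;> simp [h, ih]


-- abbreviation for the state type of the shared loop
-- (all helpers below are used only by the proofs)

theorem pvA_to_filter (ref_index : List (String × List (List (String × String)))) (norm : String)
    (init : List (List (String × String)) × PySem.Set String) :
    ref_index.foldl
      (fun st kn =>
        if kn.1 = "" then st
        else if norm = kn.1 ∨ PySem.Str.endswith norm ("/" ++ kn.1) = true then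
          kn.2.foldl pvInner st
        else st) init
    = (ref_index.filter (pvMatch norm)).foldl (fun st kn => kn.2.foldl pvInner st) init := by
  rw [← pv_foldl_filter]
  apply PySem.List.foldl_congr_mem
  intro acc x _
  by_cases h1 : x.1 = ""
  · simp [pvMatch, h1]
  · by_cases h2 : norm = x.1 ∨ PySem.Str.endswith norm ("/" ++ x.1) = true
    · rw [if_neg h1, if_pos h2, if_pos (by
        simpa [pvMatch, h1, ← PySem.Str.endswith_eq] using h2)]
    · rw [if_neg h1, if_neg h2, if_neg (by
        simpa [pvMatch, h1, ← PySem.Str.endswith_eq] using h2)]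


-- '/'-suffixes of a char list, characterised by the slash position
theorem pv_slashSuffix (cs t : List Char) :
    ('/' :: t) <:+ cs ↔ ∃ k, ∃ _h : k < cs.length, cs[k] = '/' ∧ t = cs.drop (k + 1) := by
  constructor
  · rintro ⟨pre, rfl⟩
    refine ⟨pre.length, by simp, ?_, ?_⟩
    · simp [List.getElem_append_right (le_refl pre.length)]
    · simp [List.drop_append]
  · rintro ⟨k, hk, hc, rfl⟩
    refine ⟨cs.take k, ?_⟩
    rw [← hc, List.getElem_cons_drop hk, List.take_append_drop]

-- the position dict: items and lookup
theorem pv_pos_items (ref_index : List (String × List (List (String × String))))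
    (hnd : (ref_index.map Prod.fst).Nodup) :
    ((PySem.List.enumerate ref_index 0).foldl (fun d ik => d.insert ik.2.1 ik.1) PySem.Dict.empty).items
      = (PySem.List.enumerate ref_index 0).map (fun ik => (ik.2.1, ik.1)) := by
  have hmap : (PySem.List.enumerate ref_index 0).map (fun ik => ik.2.1) = ref_index.map Prod.fst := by
    rw [show (fun (ik : Int × (String × List (List (String × String)))) => ik.2.1)
          = Prod.fst ∘ (fun ik => ik.2) from rfl, ← List.map_map, PySem.List.map_snd_enumerate]
  rw [PySem.Dict.items_foldl_insert_fresh _ _ _ _ (fun a _ => PySem.Dict.contains_empty _)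
      (hmap ▸ hnd)]
  rfl

theorem pv_pos_get (ref_index : List (String × List (List (String × String))))
    (hnd : (ref_index.map Prod.fst).Nodup) (s : String) (p : Int) :
    ((PySem.List.enumerate ref_index 0).foldl (fun d ik => d.insert ik.2.1 ik.1) PySem.Dict.empty).get? s = some p
      ↔ ∃ k, ∃ _h : k < ref_index.length, s = ref_index[k].1 ∧ p = (k : Int) := by
  have hitems := pv_pos_items ref_index hnd
  have hkeys : ((PySem.List.enumerate ref_index 0).foldl (fun d ik => d.insert ik.2.1 ik.1) PySem.Dict.empty).keys.Nodup := by
    show (List.map Prod.fst _).Nodup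
    rw [hitems, List.map_map]
    have : (Prod.fst ∘ fun (ik : Int × (String × List (List (String × String)))) => (ik.2.1, ik.1))
        = Prod.fst ∘ (fun ik => ik.2) := rfl
    rw [this, ← List.map_map, PySem.List.map_snd_enumerate]
    exact hnd
  rw [PySem.Dict.get?_eq_some_iff_mem_items _ _ _ hkeys, hitems]
  simp only [List.mem_map, PySem.List.mem_enumerate_iff]
  constructor
  · rintro ⟨ik, ⟨k, hk, rfl⟩, heq⟩
    refine ⟨k, hk, ?_, ?_⟩ <;> simp_all [Prod.ext_iff]
  · rintro ⟨k, hk, rfl, rfl⟩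
    exact ⟨(0 + (k : Int), ref_index[k]), ⟨k, hk, rfl⟩, by simp⟩

theorem pv_sliceList (norm : String) (k : Nat) :
    (PySem.Str.slice norm (some ((0 : Int) + (k : Int) + 1)) none).toList = norm.toList.drop (k + 1) := by
  have h : (0 : Int) + (k : Int) + 1 = ((k + 1 : Nat) : Int) := by push_cast; ring
  rw [PySem.Str.toList_slice, PySem.Chars.slice_eq_listSlice, h, PySem.List.slice_from_natCast]

-- membership in the tail of the candidate list = a '/'-suffix of norm
theorem pv_mem_tail (norm s : String) :
    s ∈ (PySem.List.enumerate norm.toList 0).filterMap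
        (fun ic => if ic.2 = '/' then some (PySem.Str.slice norm (some (ic.1 + 1)) none) else none)
      ↔ ('/' :: s.toList) <:+ norm.toList := by
  rw [pv_slashSuffix]
  simp only [List.mem_filterMap]
  constructor
  · rintro ⟨ic, hic, hif⟩
    rw [PySem.List.mem_enumerate_iff] at hic
    obtain ⟨k, hk, rfl⟩ := hic
    by_cases hsl : norm.toList[k] = '/'
    · refine ⟨k, hk, hsl, ?_⟩
      simp only [hsl, if_pos] at hif
      rw [← Option.some_inj.mp hif, pv_sliceList]
    · simp [hsl] at hif
  · rintro ⟨k, hk, hc, ht⟩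
    refine ⟨((0 : Int) + (k : Int), norm.toList[k]), ?_, ?_⟩
    · rw [PySem.List.mem_enumerate_iff]; exact ⟨k, hk, rfl⟩
    · simp only [hc, if_pos]
      congr 1
      apply String.toList_inj.mp
      rw [pv_sliceList, ← ht]

theorem pv_endswith_iff (norm s : String) :
    PySem.Str.endswith norm ("/" ++ s) = true ↔ ('/' :: s.toList) <:+ norm.toList := by
  rw [PySem.Str.endswith_eq, PySem.Chars.endswith_iff]
  have h : ("/" ++ s).toList = '/' :: s.toList := by simp
  rw [h]

theorem pv_cands_nodup (norm : String) :
    (norm :: (PySem.List.enumerate norm.toList 0).filterMap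
        (fun ic => if ic.2 = '/' then some (PySem.Str.slice norm (some (ic.1 + 1)) none) else none)).Nodup := by
  have hpw : List.Pairwise (fun s t : String => t.toList.length < s.toList.length)
      ((PySem.List.enumerate norm.toList 0).filterMap
        (fun ic => if ic.2 = '/' then some (PySem.Str.slice norm (some (ic.1 + 1)) none) else none)) := by
    rw [List.pairwise_filterMap]
    refine (List.Pairwise.and_mem.mp (PySem.List.pairwise_lt_enumerate norm.toList 0)).imp ?_
    rintro a b ⟨ha, hb, hlt⟩ x hx y hy
    rw [PySem.List.mem_enumerate_iff] at ha hb
    obtain ⟨k1, hk1, rfl⟩ := ha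
    obtain ⟨k2, hk2, rfl⟩ := hb
    by_cases h1 : norm.toList[k1] = '/'
    · by_cases h2 : norm.toList[k2] = '/'
      · simp only [h1, h2, if_pos, Option.some_inj] at hx hy
        have hx' : x.toList = norm.toList.drop (k1 + 1) := by rw [← hx, pv_sliceList]
        have hy' : y.toList = norm.toList.drop (k2 + 1) := by rw [← hy, pv_sliceList]
        have hk12 : k1 < k2 := by simpa using hlt
        rw [hx', hy', List.length_drop, List.length_drop]
        omega
      · simp [h2] at hy
    · simp [h1] at hx
  refine List.nodup_cons.mpr ⟨?_, ?_⟩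
  · intro hmem
    have := (pv_mem_tail norm norm).mp hmem
    have hlen := List.IsSuffix.length_le this
    simp at hlen
  · exact hpw.imp fun {a b} h e => absurd (e ▸ h) (lt_irrefl _)

theorem pvMatch_iff (norm : String) (kn : String × List (List (String × String))) :
    pvMatch norm kn = true ↔ kn.1 ≠ "" ∧ (norm = kn.1 ∨ ('/' :: kn.1.toList) <:+ norm.toList) := by
  simp [pvMatch, ← pv_endswith_iff norm kn.1]

-- the sorted hits are exactly the matched entries of the enumeration, in order
theorem pv_hits (ref_index : List (String × List (List (String × String)))) (norm : String)
    (hnd : (ref_index.map Prod.fst).Nodup) :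
    PySem.List.sorted
      ((norm :: (PySem.List.enumerate norm.toList 0).filterMap
          (fun ic => if ic.2 = '/' then some (PySem.Str.slice norm (some (ic.1 + 1)) none) else none)).filterMap
        (fun s => if s ≠ "" then
            (((PySem.List.enumerate ref_index 0).foldl (fun d ik => d.insert ik.2.1 ik.1) PySem.Dict.empty).get? s).map
              (fun p => (p, s))
          else none))
      (fun t => t.1) false
    = ((PySem.List.enumerate ref_index 0).filter (fun ik => pvMatch norm ik.2)).map (fun ik => (ik.1, ik.2.1)) := by
  have hpwE : List.Pairwise (fun a b : Int × String => a.1 < b.1)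
      (((PySem.List.enumerate ref_index 0).filter (fun ik => pvMatch norm ik.2)).map (fun ik => (ik.1, ik.2.1))) := by
    rw [List.pairwise_map]
    exact List.Pairwise.filter _ (PySem.List.pairwise_lt_enumerate ref_index 0)
  apply PySem.List.sorted_eq_of_perm_of_pairwise_lt _ _ _ ?_ hpwE
  have hEMnd : (((PySem.List.enumerate ref_index 0).filter (fun ik => pvMatch norm ik.2)).map
      (fun ik => (ik.1, ik.2.1))).Nodup :=
    hpwE.imp fun {a b} h e => absurd (e ▸ h) (lt_irrefl _)
  have hLnd : ((norm :: (PySem.List.enumerate norm.toList 0).filterMap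
          (fun ic => if ic.2 = '/' then some (PySem.Str.slice norm (some (ic.1 + 1)) none) else none)).filterMap
        (fun s => if s ≠ "" then
            (((PySem.List.enumerate ref_index 0).foldl (fun d ik => d.insert ik.2.1 ik.1) PySem.Dict.empty).get? s).map
              (fun p => (p, s))
          else none)).Nodup := by
    refine List.Nodup.filterMap ?_ (pv_cands_nodup norm)
    rintro a a' b hb hb'
    by_cases ha : a = ""
    · simp [ha] at hb
    · by_cases ha' : a' = ""
      · simp [ha'] at hb'
      · simp only [ha, ha', ne_eq, not_false_iff, if_pos, Option.mem_def,
          Option.map_eq_some_iff] at hb hb'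
        obtain ⟨q, _, rfl⟩ := hb
        obtain ⟨q', _, heq⟩ := hb'
        exact (Prod.ext_iff.mp heq).2.symm
  rw [List.perm_ext_iff_of_nodup hEMnd hLnd]
  rintro ⟨p, s⟩
  simp only [List.mem_map, List.mem_filter, PySem.List.mem_enumerate_iff, List.mem_filterMap,
    List.mem_cons]
  constructor
  · rintro ⟨ik, ⟨⟨k, hk, rfl⟩, hm⟩, heq⟩
    obtain ⟨rfl, rfl⟩ : (0 : Int) + (k : Int) = p ∧ ref_index[k].1 = s := by
      simpa [Prod.ext_iff] using heq
    rw [pvMatch_iff] at hm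
    refine ⟨ref_index[k].1, ?_, ?_⟩
    · rcases hm.2 with h | h
      · exact Or.inl h.symm
      · refine Or.inr ?_
        have := (pv_mem_tail norm ref_index[k].1).mpr h
        simpa [List.mem_filterMap, PySem.List.mem_enumerate_iff] using this
    · rw [if_pos hm.1,
        show ((PySem.List.enumerate ref_index 0).foldl (fun d ik => d.insert ik.2.1 ik.1)
            PySem.Dict.empty).get? ref_index[k].1 = some ((0 : Int) + (k : Int)) from
          (pv_pos_get ref_index hnd _ _).mpr ⟨k, hk, rfl, by ring⟩]
      rfl
  · rintro ⟨c, hc, hf⟩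
    by_cases hce : c = ""
    · simp [hce] at hf
    · rw [if_pos hce] at hf
      obtain ⟨q, hq, heq⟩ := Option.map_eq_some_iff.mp hf
      obtain ⟨rfl, rfl⟩ : q = p ∧ c = s := Prod.ext_iff.mp heq
      rw [pv_pos_get ref_index hnd] at hq
      obtain ⟨k, hk, hks, rfl⟩ := hq
      refine ⟨((0 : Int) + (k : Int), ref_index[k]), ⟨⟨k, hk, rfl⟩, ?_⟩, by
        simp [← hks]⟩
      rw [pvMatch_iff]
      refine ⟨by rw [← hks]; exact hce, ?_⟩
      rcases hc with h | h
      · exact Or.inl (by rw [← hks, h])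
      · refine Or.inr ?_
        rw [← hks]
        refine (pv_mem_tail norm c).mp ?_
        simpa [List.mem_filterMap, PySem.List.mem_enumerate_iff] using h

-- the whole B pipeline equals the filtered fold A reduces to
theorem pv_core (ref_index : List (String × List (List (String × String)))) (norm : String)
    (hnd : (ref_index.map Prod.fst).Nodup)
    (init : List (List (String × String)) × PySem.Set String) :
    (PySem.List.sorted
      ((norm :: (PySem.List.enumerate norm.toList 0).filterMap
          (fun ic => if ic.2 = '/' then some (PySem.Str.slice norm (some (ic.1 + 1)) none) else none)).filterMap
        (fun s => if s ≠ "" then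
            (((PySem.List.enumerate ref_index 0).foldl (fun d ik => d.insert ik.2.1 ik.1) PySem.Dict.empty).get? s).map
              (fun p => (p, s))
          else none))
      (fun t => t.1) false).foldl
        (fun st pk => ((PySem.Dict.get? (PySem.Dict.mk ref_index) pk.2).getD []).foldl pvInner st) init
    = (ref_index.filter (pvMatch norm)).foldl (fun st kn => kn.2.foldl pvInner st) init := by
  rw [pv_hits ref_index norm hnd, List.foldl_map]
  have hfm : ref_index.filter (pvMatch norm)
      = ((PySem.List.enumerate ref_index 0).filter (fun ik => pvMatch norm ik.2)).map (fun ik => ik.2) := by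
    conv_lhs => rw [← PySem.List.map_snd_enumerate ref_index 0]
    rw [List.filter_map]
    rfl
  rw [hfm, List.foldl_map]
  apply PySem.List.foldl_congr_mem
  intro acc ik hik
  have hmem : ik.2 ∈ ref_index := by
    have h := List.mem_of_mem_filter hik
    rw [PySem.List.mem_enumerate_iff] at h
    obtain ⟨k, hk, rfl⟩ := h
    exact List.getElem_mem hk
  have hget : (PySem.Dict.mk ref_index).get? ik.2.1 = some ik.2.2 := by
    apply PySem.Dict.get?_of_mem_items
    · show (ik.2.1, ik.2.2) ∈ ref_index
      simpa using hmem
    · show (ref_index.map (fun p => p.1)).Nodup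
      simpa using hnd
  rw [hget]
  rfl

theorem match_edit_path_to_nodes_py_spec : Claim_equal_match_edit_path_to_nodes_py := by
  intro ref_index abs_path _ hpre
  unfold Spec_match_edit_path_to_nodes_py
  by_cases hap : abs_path = ""
  · simp [match_edit_path_to_nodes_py, match_edit_path_to_nodes_py_alt, hap]
  · simp only [match_edit_path_to_nodes_py, match_edit_path_to_nodes_py_alt, hap, if_false]
    rw [pvA_to_filter, pv_core _ _ hpre.1]
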